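-- pv_equiv track=rewrite | github.com/MrPocketMonsters/herramienta-flujos-rasa | tools/compilar_flujo_csv.py | interleave_rule_steps
-- ===== SOURCE A (Python) =====
-- def interleave_rule_steps(intents: list[str], actions: list[str]) -> list[tuple[str, str]]:
--     """Intercala intents y actions por posicion: intent1, action1, intent2, action2..."""
--     steps: list[tuple[str, str]] = []
--     max_len = max(len(intents), len(actions))
--
--     for idx in range(max_len):
--         if idx < len(intents):
--             steps.append(("intent", intents[idx]))
--         if idx < len(actions):
--             steps.append(("action", actions[idx]))
--
--     return steps
-- ===== SOURCE B (Python) =====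
-- def interleave_rule_steps(intents: list[str], actions: list[str]) -> list[tuple[str, str]]:
--     """Intercala intents y actions por posicion: intent1, action1, intent2, action2..."""
--     keyed = [(2 * i, ("intent", v)) for i, v in enumerate(intents)]
--     keyed += [(2 * i + 1, ("action", v)) for i, v in enumerate(actions)]
--     keyed.sort(key=lambda kv: kv[0])
--     return [step for _, step in keyed]
-- ===== Notes on version B (the rewrite author's own statement) =====
-- stated objective: alternative
-- what changed: Replaces the guarded index loop with decorate-sort-undecorate: each intent gets position key 2i and each action key 2i+1, the two keyed lists are concatenated, sorted by key, and the keys stripped.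
import Mathlib
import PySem

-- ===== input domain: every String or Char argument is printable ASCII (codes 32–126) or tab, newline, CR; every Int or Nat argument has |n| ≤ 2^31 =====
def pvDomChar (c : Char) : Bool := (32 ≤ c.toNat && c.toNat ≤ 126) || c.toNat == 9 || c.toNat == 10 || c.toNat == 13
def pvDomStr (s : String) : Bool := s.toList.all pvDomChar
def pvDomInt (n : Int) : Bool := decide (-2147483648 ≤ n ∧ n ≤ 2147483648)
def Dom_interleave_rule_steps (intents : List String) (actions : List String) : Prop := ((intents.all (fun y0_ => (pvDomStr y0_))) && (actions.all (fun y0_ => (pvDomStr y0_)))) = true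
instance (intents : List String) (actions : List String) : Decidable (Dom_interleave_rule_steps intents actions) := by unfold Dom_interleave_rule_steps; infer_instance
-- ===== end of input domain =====

-- B replaces A's guarded index loop by decorate-sort-undecorate: key intents with 2i and actions with 2i+1, sort the concatenation by key (stable), strip the keys (alternative algorithm, same result).

-- ===== PORT A =====
-- loop body of A: append ("intent", intents[idx]) and ("action", actions[idx]) under the bounds checks
def pvStepA (intents : List String) (actions : List String)
    (steps : List (String × String)) (idx : Nat) : List (String × String) :=
  let steps := if idx < intents.length then steps ++ [("intent", intents.getD idx "")] else steps
  if idx < actions.length then steps ++ [("action", actions.getD idx "")] else steps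

def interleave_rule_steps (intents : List String) (actions : List String) : List (String × String) :=
  let maxLen := max intents.length actions.length
  (List.range maxLen).foldl (pvStepA intents actions) []

-- ===== PORT B =====
def interleave_rule_steps_alt (intents : List String) (actions : List String) : List (String × String) :=
  let keyed := (PySem.List.enumerate intents).map (fun p => (2 * p.1, ("intent", p.2)))
    ++ (PySem.List.enumerate actions).map (fun p => (2 * p.1 + 1, ("action", p.2)))
  (PySem.List.sorted keyed (fun kv => kv.1)).map (fun kv => kv.2)

-- ===== PRECONDITION & SPEC =====
def Spec_interleave_rule_steps (intents : List String) (actions : List String) (out : List (String × String)) : Prop := out = interleave_rule_steps_alt intents actions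
instance (intents : List String) (actions : List String) (out : List (String × String)) : Decidable (Spec_interleave_rule_steps intents actions out) := by unfold Spec_interleave_rule_steps; infer_instance

-- ===== CLAIM (what is proved, stated in full; the proofs are below) =====
def Claim_equal_interleave_rule_steps : Prop := ∀ (intents : List String) (actions : List String), Dom_interleave_rule_steps intents actions → Spec_interleave_rule_steps intents actions (interleave_rule_steps intents actions)

-- ===== LEMMAS AND PROOFS =====

-- the interleaving both programs compute, as a plain recursion (proof-side reference)
def pvItl : List String → List String → List (String × String)
  | [], [] => []
  | i :: is, a :: as => ("intent", i) :: ("action", a) :: pvItl is as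
  | i :: is, [] => ("intent", i) :: pvItl is []
  | [], a :: as => ("action", a) :: pvItl [] as

-- the keyed interleaving starting at position k (proof-side reference for B)
def pvKItl (k : Int) : List String → List String → List (Int × (String × String))
  | [], [] => []
  | i :: is, a :: as => (2 * k, ("intent", i)) :: (2 * k + 1, ("action", a)) :: pvKItl (k + 1) is as
  | i :: is, [] => (2 * k, ("intent", i)) :: pvKItl (k + 1) is []
  | [], a :: as => (2 * k + 1, ("action", a)) :: pvKItl (k + 1) [] as

theorem pvKItl_map_snd (is : List String) : ∀ (as : List String) (k : Int),
    (pvKItl k is as).map (fun kv => kv.2) = pvItl is as := by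
  induction is with
  | nil =>
    intro as
    induction as with
    | nil => intro k; simp [pvKItl, pvItl]
    | cons a as ih => intro k; simp [pvKItl, pvItl, ih (k + 1)]
  | cons i is ih =>
    intro as k
    cases as with
    | nil => simp [pvKItl, pvItl, ih [] (k + 1)]
    | cons a as => simp [pvKItl, pvItl, ih as (k + 1)]

theorem pvKItl_key_lb (is : List String) : ∀ (as : List String) (k : Int),
    ∀ p ∈ pvKItl k is as, 2 * k ≤ p.1 := by
  induction is with
  | nil =>
    intro as
    induction as with
    | nil => intro k p hp; simp [pvKItl] at hp
    | cons a as ih =>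
      intro k p hp
      simp only [pvKItl, List.mem_cons] at hp
      rcases hp with rfl | hp
      · omega
      · have := ih (k + 1) p hp; omega
  | cons i is ih =>
    intro as k p hp
    cases as with
    | nil =>
      simp only [pvKItl, List.mem_cons] at hp
      rcases hp with rfl | hp
      · omega
      · have := ih [] (k + 1) p hp; omega
    | cons a as =>
      simp only [pvKItl, List.mem_cons] at hp
      rcases hp with rfl | rfl | hp
      · omega
      · omega
      · have := ih as (k + 1) p hp; omega

theorem pvKItl_pairwise (is : List String) : ∀ (as : List String) (k : Int),
    (pvKItl k is as).Pairwise (fun p q => p.1 < q.1) := by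
  induction is with
  | nil =>
    intro as
    induction as with
    | nil => intro k; simp [pvKItl]
    | cons a as ih =>
      intro k
      simp only [pvKItl]
      refine List.Pairwise.cons (fun q hq => ?_) (ih (k + 1))
      have h := pvKItl_key_lb [] as (k + 1) q hq
      dsimp only; omega
  | cons i is ih =>
    intro as k
    cases as with
    | nil =>
      simp only [pvKItl]
      refine List.Pairwise.cons (fun q hq => ?_) (ih [] (k + 1))
      have h := pvKItl_key_lb is [] (k + 1) q hq
      dsimp only; omega
    | cons a as =>
      simp only [pvKItl]
      refine List.Pairwise.cons (fun q hq => ?_) (List.Pairwise.cons (fun q hq => ?_) (ih as (k + 1)))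
      · simp only [List.mem_cons] at hq
        rcases hq with rfl | hq
        · dsimp only; omega
        · have h := pvKItl_key_lb is as (k + 1) q hq
          dsimp only; omega
      · have h := pvKItl_key_lb is as (k + 1) q hq
        dsimp only; omega

theorem pvKItl_perm (is : List String) : ∀ (as : List String) (k : Int),
    (pvKItl k is as).Perm
      ((PySem.List.enumerate is k).map (fun p => (2 * p.1, ("intent", p.2)))
        ++ (PySem.List.enumerate as k).map (fun p => (2 * p.1 + 1, ("action", p.2)))) := by
  induction is with
  | nil =>
    intro as
    induction as with
    | nil => intro k; simp [pvKItl, PySem.List.enumerate_nil]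
    | cons a as ih =>
      intro k
      simp only [pvKItl, PySem.List.enumerate_nil, PySem.List.enumerate_cons, List.map_nil,
        List.map_cons, List.nil_append]
      exact (ih (k + 1)).cons _
  | cons i is ih =>
    intro as k
    cases as with
    | nil =>
      simp only [pvKItl, PySem.List.enumerate_nil, PySem.List.enumerate_cons, List.map_nil,
        List.map_cons, List.append_nil]
      have h : (pvKItl (k + 1) is []).Perm
          ((PySem.List.enumerate is (k + 1)).map (fun p => (2 * p.1, ("intent", p.2)))) := by
        simpa using ih [] (k + 1)
      exact h.cons _
    | cons a as =>
      simp only [pvKItl, PySem.List.enumerate_cons, List.map_cons, List.cons_append]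
      refine List.Perm.cons _ ?_
      have h := (ih as (k + 1)).cons ((2 * k + 1, ("action", a)) :
        Int × (String × String))
      refine h.trans ?_
      exact List.perm_middle.symm

theorem alt_eq_pvItl (intents actions : List String) :
    interleave_rule_steps_alt intents actions = pvItl intents actions := by
  show (PySem.List.sorted
      ((PySem.List.enumerate intents).map (fun p => (2 * p.1, ("intent", p.2)))
        ++ (PySem.List.enumerate actions).map (fun p => (2 * p.1 + 1, ("action", p.2))))
      (fun kv => kv.1)).map (fun kv => kv.2) = pvItl intents actions
  rw [PySem.List.sorted_eq_of_perm_of_pairwise_lt _ (pvKItl 0 intents actions) (fun kv => kv.1)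
    (pvKItl_perm intents actions 0) (pvKItl_pairwise intents actions 0)]
  exact pvKItl_map_snd intents actions 0

-- shifting A's loop to the tails
theorem pvStepA_shift (i a : String) (is as : List String)
    (acc : List (String × String)) (k : Nat) :
    pvStepA (i :: is) (a :: as) acc (k + 1) = pvStepA is as acc k := by
  simp [pvStepA]

theorem pvStepA_shift_left (i : String) (is : List String)
    (acc : List (String × String)) (k : Nat) :
    pvStepA (i :: is) [] acc (k + 1) = pvStepA is [] acc k := by
  simp [pvStepA]

theorem pvStepA_shift_right (a : String) (as : List String)
    (acc : List (String × String)) (k : Nat) :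
    pvStepA [] (a :: as) acc (k + 1) = pvStepA [] as acc k := by
  simp [pvStepA]

-- main loop invariant: A's fold over range (max len) appends pvItl to the accumulator
theorem foldA_eq (intents : List String) : ∀ (actions : List String) (acc : List (String × String)),
    (List.range (max intents.length actions.length)).foldl (pvStepA intents actions) acc
      = acc ++ pvItl intents actions := by
  induction intents with
  | nil =>
    intro actions
    induction actions with
    | nil => intro acc; simp [pvItl]
    | cons a as ih =>
      intro acc
      simp only [List.length_nil, List.length_cons, Nat.max_eq_right (Nat.zero_le _),
        List.range_succ_eq_map, List.foldl_cons, List.foldl_map]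
      have hf : (fun (b : List (String × String)) (k : Nat) => pvStepA [] (a :: as) b k.succ)
          = pvStepA [] as := by
        funext b k; exact pvStepA_shift_right a as b k
      rw [hf]
      have := ih (pvStepA [] (a :: as) acc 0)
      simp only [List.length_nil, Nat.max_eq_right (Nat.zero_le _)] at this
      rw [this]
      simp [pvStepA, pvItl]
  | cons i is ih =>
    intro actions
    cases actions with
    | cons a as =>
      intro acc
      simp only [List.length_cons, Nat.succ_max_succ, List.range_succ_eq_map,
        List.foldl_cons, List.foldl_map]
      have hf : (fun (b : List (String × String)) (k : Nat) => pvStepA (i :: is) (a :: as) b k.succ)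
          = pvStepA is as := by
        funext b k; exact pvStepA_shift i a is as b k
      rw [hf]
      rw [ih as (pvStepA (i :: is) (a :: as) acc 0)]
      simp [pvStepA, pvItl]
    | nil =>
      intro acc
      simp only [List.length_cons, List.length_nil, Nat.max_eq_left (Nat.zero_le _),
        List.range_succ_eq_map, List.foldl_cons, List.foldl_map]
      have hf : (fun (b : List (String × String)) (k : Nat) => pvStepA (i :: is) [] b k.succ)
          = pvStepA is [] := by
        funext b k; exact pvStepA_shift_left i is b k
      rw [hf]
      have := ih [] (pvStepA (i :: is) [] acc 0)
      simp only [List.length_nil, Nat.max_eq_left (Nat.zero_le _)] at this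
      rw [this]
      simp [pvStepA, pvItl]

-- ===== VERDICT (by name: the statement is the Claim_ definition above) =====
theorem interleave_rule_steps_spec : Claim_equal_interleave_rule_steps := by
  intro intents actions _
  show interleave_rule_steps intents actions = interleave_rule_steps_alt intents actions
  rw [alt_eq_pvItl]
  simpa [interleave_rule_steps] using foldA_eq intents actions []
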